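-- pv_equiv track=rewrite | github.com/Jo-Blade/IP_Router_Ada | Routeur_LA/test.py | fusionPrintStruct
-- ===== SOURCE A (Python) =====
-- def fusionPrintStruct(l1, l2, n1, n2):
--     if len(l1) + len(l2) == 0:
--         return []
--
--     la, lb = "", ""
--     if l1:
--         la = l1.pop()
--     if l2:
--         lb = l2.pop()
--
--     na = (n1 - len(la))//2
--     nb = (n2 - len(lb))//2
--
--     l = " "*na + la + " "*na + " "*nb + lb + " "*nb
--     L = fusionPrintStruct(l1,l2,n1,n2)
--     L.append(l)
--     return L
-- ===== SOURCE B (Python) =====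
-- def fusionPrintStruct(l1, l2, n1, n2):
--     res = []
--     while l1 or l2:
--         la = l1.pop() if l1 else ""
--         lb = l2.pop() if l2 else ""
--         na = (n1 - len(la)) // 2
--         nb = (n2 - len(lb)) // 2
--         res.append(" "*na + la + " "*na + " "*nb + lb + " "*nb)
--     res.reverse()
--     return res
-- ===== Notes on version B (the rewrite author's own statement) =====
-- stated objective: alternative
-- what changed: Replaced the linear recursion (recurse first, append after) with an explicit while-loop that pops lines back-to-front into an accumulator list and reverses it once at the end; same in-place emptying of both argument lists.
import Mathlib
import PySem

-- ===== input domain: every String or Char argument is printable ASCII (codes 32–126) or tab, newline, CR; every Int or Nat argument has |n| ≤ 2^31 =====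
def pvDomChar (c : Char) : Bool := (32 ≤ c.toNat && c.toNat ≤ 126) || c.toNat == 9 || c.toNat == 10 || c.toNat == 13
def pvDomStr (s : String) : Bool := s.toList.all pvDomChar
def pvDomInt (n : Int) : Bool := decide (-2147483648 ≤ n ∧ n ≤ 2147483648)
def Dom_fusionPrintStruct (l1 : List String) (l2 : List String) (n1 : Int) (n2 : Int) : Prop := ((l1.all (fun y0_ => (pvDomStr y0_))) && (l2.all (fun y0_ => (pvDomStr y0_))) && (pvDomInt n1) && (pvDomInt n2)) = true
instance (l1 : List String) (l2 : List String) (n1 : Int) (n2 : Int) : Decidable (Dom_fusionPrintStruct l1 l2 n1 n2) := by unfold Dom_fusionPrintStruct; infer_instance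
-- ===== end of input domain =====

-- B replaces A's linear recursion by an explicit pop-from-the-end loop with an accumulator
-- reversed once at the end (objective: alternative decomposition). Both Pythons empty the two
-- argument lists in place identically; the equivalence proved here is about the return value.

-- ===== PORT A =====
-- the padded line " "*na + la + " "*na + " "*nb + lb + " "*nb (identical expression in A and B)
def pvLine (la lb : String) (n1 n2 : Int) : String :=
  let na := PySem.Int.floordiv (n1 - PySem.Str.len la) 2
  let nb := PySem.Int.floordiv (n2 - PySem.Str.len lb) 2
  String.ofList (PySem.List.pyRepeat [' '] na ++ la.toList ++ PySem.List.pyRepeat [' '] na ++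
                 PySem.List.pyRepeat [' '] nb ++ lb.toList ++ PySem.List.pyRepeat [' '] nb)

def fusionPrintStruct (l1 : List String) (l2 : List String) (n1 : Int) (n2 : Int) : List String :=
  if h : l1.length + l2.length = 0 then []
  else
    let la := if l1.isEmpty then "" else l1.getLast!   -- l1.pop()
    let lb := if l2.isEmpty then "" else l2.getLast!   -- l2.pop()
    let l := pvLine la lb n1 n2
    let L := fusionPrintStruct l1.dropLast l2.dropLast n1 n2
    L ++ [l]
termination_by l1.length + l2.length
decreasing_by simp [List.length_dropLast]; omega

-- ===== PORT B =====
def fpsLoop (l1 : List String) (l2 : List String) (n1 : Int) (n2 : Int) (res : List String) : List String :=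
  if h : l1.isEmpty ∧ l2.isEmpty then res
  else
    let la := if l1.isEmpty then "" else l1.getLast!   -- l1.pop() if l1 else ""
    let lb := if l2.isEmpty then "" else l2.getLast!   -- l2.pop() if l2 else ""
    fpsLoop l1.dropLast l2.dropLast n1 n2 (res ++ [pvLine la lb n1 n2])
termination_by l1.length + l2.length
decreasing_by
  simp only [List.length_dropLast]
  rw [Decidable.not_and_iff_or_not] at h
  rcases h with h | h <;> simp only [List.isEmpty_iff, ← List.length_eq_zero_iff] at h <;> omega

def fusionPrintStruct_alt (l1 : List String) (l2 : List String) (n1 : Int) (n2 : Int) : List String :=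
  (fpsLoop l1 l2 n1 n2 []).reverse

-- ===== PRECONDITION & SPEC =====
def Spec_fusionPrintStruct (l1 : List String) (l2 : List String) (n1 : Int) (n2 : Int) (out : List String) : Prop := out = fusionPrintStruct_alt l1 l2 n1 n2
instance (l1 : List String) (l2 : List String) (n1 : Int) (n2 : Int) (out : List String) : Decidable (Spec_fusionPrintStruct l1 l2 n1 n2 out) := by unfold Spec_fusionPrintStruct; infer_instance

-- ===== CLAIM (what is proved, stated in full; the proofs are below) =====
def Claim_equal_fusionPrintStruct : Prop := ∀ (l1 : List String) (l2 : List String) (n1 : Int) (n2 : Int), Dom_fusionPrintStruct l1 l2 n1 n2 → Spec_fusionPrintStruct l1 l2 n1 n2 (fusionPrintStruct l1 l2 n1 n2)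

-- ===== LEMMAS AND PROOFS =====
theorem pv_drop_le {l1 l2 : List String} {k : Nat}
    (h : ¬ (l1.isEmpty ∧ l2.isEmpty)) (hk : l1.length + l2.length ≤ k + 1) :
    l1.dropLast.length + l2.dropLast.length ≤ k := by
  simp only [List.length_dropLast]
  rw [Decidable.not_and_iff_or_not] at h
  rcases h with h | h <;> simp only [List.isEmpty_iff, ← List.length_eq_zero_iff] at h <;> omega

theorem fpsLoop_acc (n1 n2 : Int) (k : Nat) :
    ∀ (l1 l2 : List String), l1.length + l2.length ≤ k →
    ∀ res, fpsLoop l1 l2 n1 n2 res = res ++ fpsLoop l1 l2 n1 n2 [] := by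
  induction k with
  | zero =>
    intro l1 l2 hk res
    have h1 : l1 = [] := by cases l1 <;> simp_all
    have h2 : l2 = [] := by cases l2 <;> simp_all
    subst h1; subst h2
    conv_lhs => rw [fpsLoop]
    conv_rhs => rw [fpsLoop]
    simp
  | succ k ih =>
    intro l1 l2 hk res
    by_cases h : l1.isEmpty ∧ l2.isEmpty
    · conv_lhs => rw [fpsLoop]
      conv_rhs => rw [fpsLoop]
      simp [h]
    · have hlt := pv_drop_le h hk
      conv_lhs => rw [fpsLoop]
      conv_rhs => rw [fpsLoop]
      simp only [dif_neg h, List.nil_append]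
      conv_rhs => rw [ih _ _ hlt]
      conv_lhs => rw [ih _ _ hlt]
      simp

theorem fps_eq_bounded (n1 n2 : Int) (k : Nat) :
    ∀ (l1 l2 : List String), l1.length + l2.length ≤ k →
    fusionPrintStruct l1 l2 n1 n2 = (fpsLoop l1 l2 n1 n2 []).reverse := by
  induction k with
  | zero =>
    intro l1 l2 hk
    have h1 : l1 = [] := by cases l1 <;> simp_all
    have h2 : l2 = [] := by cases l2 <;> simp_all
    subst h1; subst h2
    rw [fusionPrintStruct]
    conv_rhs => rw [fpsLoop]
    simp
  | succ k ih =>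
    intro l1 l2 hk
    by_cases h : l1.length + l2.length = 0
    · have h1 : l1 = [] := by cases l1 <;> simp_all
      have h2 : l2 = [] := by cases l2 <;> simp_all
      subst h1; subst h2
      rw [fusionPrintStruct]
      conv_rhs => rw [fpsLoop]
      simp
    · have hne : ¬ (l1.isEmpty ∧ l2.isEmpty) := by
        simp only [List.isEmpty_iff]
        rintro ⟨rfl, rfl⟩; simp at h
      have hlt := pv_drop_le hne hk
      rw [fusionPrintStruct]
      conv_rhs => rw [fpsLoop]
      simp only [dif_neg h, dif_neg hne, List.nil_append]
      conv_rhs => rw [fpsLoop_acc n1 n2 k _ _ hlt]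
      rw [ih _ _ hlt]
      simp

-- ===== VERDICT (by name: the statement is the Claim_ definition above) =====
theorem fusionPrintStruct_spec : Claim_equal_fusionPrintStruct := by
  intro l1 l2 n1 n2 _hdom
  show fusionPrintStruct l1 l2 n1 n2 = fusionPrintStruct_alt l1 l2 n1 n2
  rw [fusionPrintStruct_alt]
  exact fps_eq_bounded n1 n2 (l1.length + l2.length) l1 l2 le_rfl
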